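-- pv_equiv track=rewrite | github.com/maxProMax/elementsOfProgrammingInterviewsinPython-JavaScript | Part_II/Data_Structures_and_Algoritms/python/Heaps.py | sort_increasing_decreasing_array
-- ===== SOURCE A (Python) =====
-- import heapq
--
-- def merge_sorted_arrays(sorted_arrays):
--     min_heap = []
--     sorted_arrays_iters = [iter(x) for x in sorted_arrays]
--
--     for i, it in enumerate(sorted_arrays_iters):
--         first_element = next(it, None)
--
--         if first_element is not None:
--             heapq.heappush(min_heap, (first_element, i))
--
--     result = []
--
--     while min_heap:
--         smallest_entry, smallest_array_i = heapq.heappop(min_heap)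
--         smallest_array_iter = sorted_arrays_iters[smallest_array_i]
--         result.append(smallest_entry)
--         next_element = next(smallest_array_iter, None)
--
--         if next_element is not None:
--             heapq.heappush(min_heap, (next_element, smallest_array_i))
--
--     return result
--
-- def sort_increasing_decreasing_array(A):
--     sorted_subarrays = []
--     INCREACSING, DECREASING = range(2)
--     subarrays_type = INCREACSING
--
--     start_idx = 0
--
--     for i in range(1, len(A) + 1):
--         if (i == len(A)
--             or (A[i - 1] < A[i] and subarrays_type == DECREASING)
--                 or (A[i - 1] >= A[i] and subarrays_type == INCREACSING)):
--             sorted_subarrays.append(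
--                 A[start_idx:i] if subarrays_type == INCREACSING else A[i-1:start_idx - 1:-1])
--             start_idx = i
--             subarrays_type = DECREASING if subarrays_type == INCREACSING else INCREACSING
--
--     return merge_sorted_arrays(sorted_subarrays)
-- ===== SOURCE B (Python) =====
-- def sort_increasing_decreasing_array(A):
--     # One-shot comparison sort of the whole list; the run-split + k-way
--     # heap merge of the original produces the same ascending ordering.
--     return sorted(A)
-- ===== Notes on version B (the rewrite author's own statement) =====
-- stated objective: simpler
-- what changed: Replaced run detection plus k-way heap merge by a single built-in comparison sort of the whole list.
import Mathlib
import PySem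

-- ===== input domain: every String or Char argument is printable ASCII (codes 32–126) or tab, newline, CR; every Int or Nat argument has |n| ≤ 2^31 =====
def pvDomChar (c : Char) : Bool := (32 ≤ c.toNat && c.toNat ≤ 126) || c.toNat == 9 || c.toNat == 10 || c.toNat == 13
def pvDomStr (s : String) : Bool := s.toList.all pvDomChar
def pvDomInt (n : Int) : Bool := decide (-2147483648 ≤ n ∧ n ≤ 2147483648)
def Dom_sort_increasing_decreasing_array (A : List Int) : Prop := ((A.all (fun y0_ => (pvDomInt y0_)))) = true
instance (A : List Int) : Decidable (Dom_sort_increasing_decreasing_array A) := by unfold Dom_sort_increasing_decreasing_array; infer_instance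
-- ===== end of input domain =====

-- B replaces A's run-detection + k-way heap merge by one direct comparison sort of the list (objective: simpler).

-- ===== PORT A =====
-- Python tuple comparison (value, run-index) used by heapq: strict lexicographic order.
def pvPairLt (p q : Int × Nat) : Bool := p.1 < q.1 || (p.1 == q.1 && p.2 < q.2)

-- the smallest tuple in the heap (heapq pops the minimum; the min is what heappop returns)
def pvHeapMin (a : Int × Nat) (l : List (Int × Nat)) : Int × Nat :=
  match l with
  | [] => a
  | q :: qs => pvHeapMin (if pvPairLt q a then q else a) qs

-- termination helpers for the merge loop (cited in decreasing_by)
theorem pvHeapMin_mem (a : Int × Nat) (l : List (Int × Nat)) : pvHeapMin a l ∈ a :: l := by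
  induction l generalizing a with
  | nil => simp [pvHeapMin]
  | cons b l ih =>
    simp only [pvHeapMin]
    have h := ih (if pvPairLt b a then b else a)
    rw [List.mem_cons] at h
    rcases h with h | h
    · rw [h]; split <;> simp
    · simp [h]

theorem pv_length_erase_min (p : Int × Nat) (ps : List (Int × Nat)) :
    ((p :: ps).erase (pvHeapMin p ps)).length = ps.length := by
  have h := pvHeapMin_mem p ps
  rw [List.length_erase_of_mem h]
  simp

theorem pv_sum_set {iters : List (List Int)} {i : Nat} {x : Int} {xs : List Int}
    (h : iters.getD i [] = x :: xs) :
    (((iters.set i xs).map List.length).sum) + 1 = ((iters.map List.length).sum) := by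
  induction iters generalizing i with
  | nil => simp [List.getD] at h
  | cons l ls ih =>
    cases i with
    | zero => simp [List.getD] at h; subst h; simp; omega
    | succ j =>
      have := ih (i := j) (by simpa [List.getD] using h)
      simp only [List.set, List.map, List.sum_cons]
      omega

-- the while-heap loop of merge_sorted_arrays: pop the min tuple, emit it, advance its iterator
def pvMergeLoop (iters : List (List Int)) (heap : List (Int × Nat)) : List Int :=
  match heap with
  | [] => []
  | p :: ps =>
    match hit : iters.getD (pvHeapMin p ps).2 [] with
    | [] =>
      (pvHeapMin p ps).1 :: pvMergeLoop iters ((p :: ps).erase (pvHeapMin p ps))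
    | x :: xs =>
      (pvHeapMin p ps).1 ::
        pvMergeLoop (iters.set (pvHeapMin p ps).2 xs)
          ((x, (pvHeapMin p ps).2) :: (p :: ps).erase (pvHeapMin p ps))
  termination_by (iters.map List.length).sum + heap.length
  decreasing_by
  · have := pv_length_erase_min p ps
    simp only [List.length_cons] at *
    omega
  · have h1 := pv_length_erase_min p ps
    have h2 := pv_sum_set hit
    simp only [List.length_cons] at *
    omega

-- initial heap: for i, it in enumerate(iters): push (first element, i) when the run is nonempty
def pvInitHeap (ls : List (List Int)) (i : Nat) : List (Int × Nat) :=
  match ls with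
  | [] => []
  | [] :: rest => pvInitHeap rest (i + 1)
  | (x :: _) :: rest => (x, i) :: pvInitHeap rest (i + 1)

def merge_sorted_arrays (sorted_arrays : List (List Int)) : List Int :=
  -- each iterator has had next() called once, so it holds the tail of its run
  pvMergeLoop (sorted_arrays.map List.tail) (pvInitHeap sorted_arrays 0)

-- the run-splitting loop of sort_increasing_decreasing_array, i = 1 .. len(A)
-- (A.getD j 0 is exact: both indices are read only under the guard that puts them in range)
def pvSplitLoop (A : List Int) (subs : List (List Int)) (typ : Nat) (start : Nat) (i : Nat) :
    List (List Int) :=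
  if i ≤ A.length then
    if i == A.length
        || (decide (A.getD (i-1) 0 < A.getD i 0) && typ == 1)
        || (decide (A.getD i 0 ≤ A.getD (i-1) 0) && typ == 0) then
      let seg := if typ == 0 then PySem.List.slice A (some (start : Int)) (some (i : Int))
                 else (PySem.List.slice? A (some ((i : Int) - 1)) (some ((start : Int) - 1)) (-1)).getD []
      pvSplitLoop A (subs ++ [seg]) (if typ == 0 then 1 else 0) i (i + 1)
    else pvSplitLoop A subs typ start (i + 1)
  else subs
  termination_by A.length + 1 - i

def sort_increasing_decreasing_array (A : List Int) : List Int :=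
  merge_sorted_arrays (pvSplitLoop A [] 0 0 1)

-- ===== PORT B =====
def sort_increasing_decreasing_array_alt (A : List Int) : List Int :=
  PySem.List.sorted A (fun x => x) false

-- ===== PRECONDITION & SPEC =====
def Spec_sort_increasing_decreasing_array (A : List Int) (out : List Int) : Prop := out = sort_increasing_decreasing_array_alt A
instance (A : List Int) (out : List Int) : Decidable (Spec_sort_increasing_decreasing_array A out) := by unfold Spec_sort_increasing_decreasing_array; infer_instance

-- ===== CLAIM (what is proved, stated in full; the proofs are below) =====
def Claim_equal_sort_increasing_decreasing_array : Prop := ∀ (A : List Int), Dom_sort_increasing_decreasing_array A → Spec_sort_increasing_decreasing_array A (sort_increasing_decreasing_array A)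

-- ===== LEMMAS AND PROOFS =====

-- decoding the tuple comparison on first components
theorem pvPairLt_true_le {q m : Int × Nat} (h : pvPairLt q m = true) : q.1 ≤ m.1 := by
  simp [pvPairLt] at h
  rcases h with h | h <;> omega

theorem pvPairLt_not_le {q m : Int × Nat} (h : ¬ pvPairLt q m = true) : m.1 ≤ q.1 := by
  simp [pvPairLt] at h
  omega

-- the popped tuple has the smallest value in the heap
theorem pvHeapMin_le (a : Int × Nat) (l : List (Int × Nat)) :
    ∀ q ∈ a :: l, (pvHeapMin a l).1 ≤ q.1 := by
  induction l generalizing a with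
  | nil => intro q hq; simp at hq; subst hq; simp [pvHeapMin]
  | cons b l ih =>
    intro q hq
    simp only [pvHeapMin]
    have hif1 : (if pvPairLt b a then b else a).1 ≤ a.1 := by
      split
      · exact pvPairLt_true_le ‹_›
      · exact le_refl a.1
    have hif2 : (if pvPairLt b a then b else a).1 ≤ b.1 := by
      split
      · exact le_refl b.1
      · exact pvPairLt_not_le ‹_›
    have hhead := ih (if pvPairLt b a then b else a) _ (List.mem_cons_self ..)
    rw [List.mem_cons, List.mem_cons] at hq
    rcases hq with rfl | rfl | hq
    · exact le_trans hhead hif1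
    · exact le_trans hhead hif2
    · exact ih _ q (List.mem_cons_of_mem _ hq)

-- one merge step keeps the multiset: heap values ++ remaining run elements
theorem pv_flatten_set_perm {iters : List (List Int)} {i : Nat} {x : Int} {xs : List Int}
    (h : iters.getD i [] = x :: xs) :
    iters.flatten.Perm (x :: (iters.set i xs).flatten) := by
  induction iters generalizing i with
  | nil => simp [List.getD] at h
  | cons l ls ih =>
    cases i with
    | zero =>
      simp only [List.getD, List.getElem?_cons_zero, Option.getD_some] at h
      subst h
      simp
    | succ j =>
      have hj := ih (i := j) (by simpa [List.getD] using h)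
      simp only [List.set, List.flatten_cons]
      exact (hj.append_left l).trans List.perm_middle

-- the merge loop emits exactly the heap values plus all remaining run elements
theorem pvMergeLoop_perm (iters : List (List Int)) (heap : List (Int × Nat))
    (cov : ∀ j, iters.getD j [] ≠ [] → ∃ v, (v, j) ∈ heap) :
    (pvMergeLoop iters heap).Perm (heap.map Prod.fst ++ iters.flatten) := by
  induction iters, heap using pvMergeLoop.induct with
  | case1 iters =>
    have hflat : iters.flatten = [] := by
      rw [List.flatten_eq_nil_iff]
      intro l hl
      obtain ⟨j, hj, rfl⟩ := List.mem_iff_getElem.mp hl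
      by_contra hne
      obtain ⟨v, hv⟩ := cov j (by rwa [List.getD_eq_getElem _ _ hj])
      simp at hv
    simp [pvMergeLoop, hflat]
  | case2 iters p ps hit ih =>
    have hm : pvHeapMin p ps ∈ p :: ps := pvHeapMin_mem p ps
    have hperm : (p :: ps).Perm (pvHeapMin p ps :: (p :: ps).erase (pvHeapMin p ps)) :=
      List.perm_cons_erase hm
    have cov' : ∀ j, iters.getD j [] ≠ [] → ∃ v, (v, j) ∈ (p :: ps).erase (pvHeapMin p ps) := by
      intro j hj
      have hne : j ≠ (pvHeapMin p ps).2 := by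
        intro h; rw [h] at hj; exact hj hit
      obtain ⟨v, hv⟩ := cov j hj
      exact ⟨v, (List.mem_erase_of_ne (by intro h; apply hne; rw [← h])).mpr hv⟩
    rw [pvMergeLoop]
    split
    · exact ((ih cov').cons _).trans ((hperm.symm.map Prod.fst).append_right _)
    · rename_i x' xs' h'; rw [h'] at hit; cases hit
  | case3 iters p ps x xs hit ih =>
    have hm : pvHeapMin p ps ∈ p :: ps := pvHeapMin_mem p ps
    have hperm : (p :: ps).Perm (pvHeapMin p ps :: (p :: ps).erase (pvHeapMin p ps)) :=
      List.perm_cons_erase hm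
    have cov' : ∀ j, (iters.set (pvHeapMin p ps).2 xs).getD j [] ≠ [] →
        ∃ v, (v, j) ∈ (x, (pvHeapMin p ps).2) :: (p :: ps).erase (pvHeapMin p ps) := by
      intro j hj
      by_cases hje : j = (pvHeapMin p ps).2
      · exact ⟨x, by rw [hje]; exact List.mem_cons_self ..⟩
      · have hgd : iters.getD j [] ≠ [] := by
          rwa [List.getD_eq_getElem?_getD, List.getElem?_set_ne (by omega),
            ← List.getD_eq_getElem?_getD] at hj
        obtain ⟨v, hv⟩ := cov j hgd
        exact ⟨v, List.mem_cons_of_mem _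
          ((List.mem_erase_of_ne (by intro h; apply hje; rw [← h])).mpr hv)⟩
    have hflat : iters.flatten.Perm (x :: (iters.set (pvHeapMin p ps).2 xs).flatten) :=
      pv_flatten_set_perm hit
    rw [pvMergeLoop]
    split
    · rename_i h'; rw [h'] at hit; cases hit
    · rename_i x' xs' h'
      rw [h'] at hit
      injection hit with hx hxs
      subst hx; subst hxs
      refine ((ih cov').cons _).trans ?_
      refine (List.Perm.cons _ (List.perm_middle.symm)).trans ?_
      refine (List.Perm.cons _ ((hflat.symm).append_left _)).trans ?_
      exact (hperm.symm.map Prod.fst).append_right _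

-- the merge loop output is sorted, given sorted runs each lower-bounded by its heap entry
theorem pvMergeLoop_sorted (iters : List (List Int)) (heap : List (Int × Nat))
    (hruns : ∀ l ∈ iters, l.Pairwise (· ≤ ·))
    (hbnd : ∀ p ∈ heap, ∀ y ∈ iters.getD p.2 [], p.1 ≤ y) :
    (pvMergeLoop iters heap).Pairwise (· ≤ ·) ∧
      ∀ y ∈ pvMergeLoop iters heap, ∃ p ∈ heap, p.1 ≤ y := by
  induction iters, heap using pvMergeLoop.induct with
  | case1 iters =>
    rw [pvMergeLoop]
    exact ⟨List.Pairwise.nil, by simp⟩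
  | case2 iters p ps hit ih =>
    have hm : pvHeapMin p ps ∈ p :: ps := pvHeapMin_mem p ps
    have hmin := pvHeapMin_le p ps
    have hbnd' : ∀ q ∈ (p :: ps).erase (pvHeapMin p ps), ∀ y ∈ iters.getD q.2 [], q.1 ≤ y :=
      fun q hq => hbnd q (List.erase_subset hq)
    obtain ⟨ihp, ihb⟩ := ih hruns hbnd'
    rw [pvMergeLoop]
    split
    · constructor
      · rw [List.pairwise_cons]
        refine ⟨?_, ihp⟩
        intro y hy
        obtain ⟨q, hq, hle⟩ := ihb y hy
        exact le_trans (hmin q (List.erase_subset hq)) hle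
      · intro y hy
        rw [List.mem_cons] at hy
        rcases hy with rfl | hy
        · exact ⟨pvHeapMin p ps, hm, le_refl _⟩
        · obtain ⟨q, hq, hle⟩ := ihb y hy
          exact ⟨q, List.erase_subset hq, hle⟩
    · rename_i x' xs' h'; rw [h'] at hit; cases hit
  | case3 iters p ps x xs hit ih =>
    have hm : pvHeapMin p ps ∈ p :: ps := pvHeapMin_mem p ps
    have hmin := pvHeapMin_le p ps
    have hlt : (pvHeapMin p ps).2 < iters.length := by
      by_contra hge
      rw [List.getD_eq_getElem?_getD, List.getElem?_eq_none (by omega)] at hit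
      cases hit
    have helem : iters[(pvHeapMin p ps).2] = x :: xs := by
      rw [List.getD_eq_getElem _ _ hlt] at hit; exact hit
    have hxxs : (x :: xs).Pairwise (· ≤ ·) := by
      refine hruns _ ?_
      rw [← helem]
      exact List.getElem_mem hlt
    have hx_le : ∀ y ∈ xs, x ≤ y := (List.pairwise_cons.mp hxxs).1
    have hruns' : ∀ l ∈ iters.set (pvHeapMin p ps).2 xs, l.Pairwise (· ≤ ·) := by
      intro l hl
      rcases List.mem_or_eq_of_mem_set hl with hl' | rfl
      · exact hruns l hl'
      · exact (List.pairwise_cons.mp hxxs).2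
    have hgdset : (iters.set (pvHeapMin p ps).2 xs).getD (pvHeapMin p ps).2 [] = xs := by
      rw [List.getD_eq_getElem?_getD, List.getElem?_set_self hlt, Option.getD_some]
    have hbnd' : ∀ q ∈ (x, (pvHeapMin p ps).2) :: (p :: ps).erase (pvHeapMin p ps),
        ∀ y ∈ (iters.set (pvHeapMin p ps).2 xs).getD q.2 [], q.1 ≤ y := by
      intro q hq y hy
      rw [List.mem_cons] at hq
      rcases hq with rfl | hq
      · rw [hgdset] at hy
        exact hx_le y hy
      · have hqheap : q ∈ p :: ps := List.erase_subset hq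
        by_cases hje : q.2 = (pvHeapMin p ps).2
        · rw [hje, hgdset] at hy
          exact hbnd q hqheap y (by rw [hje, hit]; exact List.mem_cons_of_mem _ hy)
        · rw [List.getD_eq_getElem?_getD, List.getElem?_set_ne (by omega),
            ← List.getD_eq_getElem?_getD] at hy
          exact hbnd q hqheap y hy
    obtain ⟨ihp, ihb⟩ := ih hruns' hbnd'
    have hheap' : ∀ q ∈ (x, (pvHeapMin p ps).2) :: (p :: ps).erase (pvHeapMin p ps),
        (pvHeapMin p ps).1 ≤ q.1 := by
      intro q hq
      rw [List.mem_cons] at hq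
      rcases hq with rfl | hq
      · exact hbnd _ hm x (by rw [hit]; exact List.mem_cons_self ..)
      · exact hmin q (List.erase_subset hq)
    rw [pvMergeLoop]
    split
    · rename_i h'; rw [h'] at hit; cases hit
    · rename_i x' xs' h'
      rw [h'] at hit
      injection hit with hx hxs
      subst hx; subst hxs
      constructor
      · rw [List.pairwise_cons]
        refine ⟨?_, ihp⟩
        intro y hy
        obtain ⟨q, hq, hle⟩ := ihb y hy
        exact le_trans (hheap' q hq) hle
      · intro y hy
        rw [List.mem_cons] at hy
        rcases hy with rfl | hy
        · exact ⟨pvHeapMin p ps, hm, le_refl _⟩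
        · obtain ⟨q, hq, hle⟩ := ihb y hy
          exact ⟨pvHeapMin p ps, hm, le_trans (hheap' q hq) hle⟩

-- ----- initial heap: membership, characterisation, multiset -----

theorem pvInitHeap_mem (ls : List (List Int)) (i j : Nat) (x : Int) (xs : List Int)
    (hj : j < ls.length) (he : ls[j] = x :: xs) : (x, i + j) ∈ pvInitHeap ls i := by
  induction ls generalizing i j with
  | nil => simp at hj
  | cons l rest ih =>
    cases j with
    | zero =>
      simp at he
      subst he
      simp [pvInitHeap]
    | succ j =>
      have hmem := ih (i + 1) j (by simpa using hj) (by simpa using he)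
      have : i + (j + 1) = (i + 1) + j := by omega
      rw [this]
      cases l with
      | nil => simpa [pvInitHeap] using hmem
      | cons a t => exact List.mem_cons_of_mem _ hmem

theorem pvInitHeap_char (ls : List (List Int)) (i : Nat) :
    ∀ p ∈ pvInitHeap ls i, ∃ j, p.2 = i + j ∧ ∃ h : j < ls.length, ∃ xs, ls[j] = p.1 :: xs := by
  induction ls generalizing i with
  | nil => simp [pvInitHeap]
  | cons l rest ih =>
    intro p hp
    cases l with
    | nil =>
      obtain ⟨j, hj1, hj2, xs, hxs⟩ := ih (i + 1) p (by simpa [pvInitHeap] using hp)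
      exact ⟨j + 1, by omega, by simpa using hj2, xs, by simpa using hxs⟩
    | cons a t =>
      rw [pvInitHeap, List.mem_cons] at hp
      rcases hp with rfl | hp
      · exact ⟨0, by omega, by simp, t, by simp⟩
      · obtain ⟨j, hj1, hj2, xs, hxs⟩ := ih (i + 1) p hp
        exact ⟨j + 1, by omega, by simpa using hj2, xs, by simpa using hxs⟩

theorem pvInitHeap_perm (ls : List (List Int)) (i : Nat) :
    ((pvInitHeap ls i).map Prod.fst ++ (ls.map List.tail).flatten).Perm ls.flatten := by
  induction ls generalizing i with
  | nil => simp [pvInitHeap]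
  | cons l rest ih =>
    cases l with
    | nil => simpa [pvInitHeap] using ih (i + 1)
    | cons a t =>
      simp only [pvInitHeap, List.map_cons, List.flatten_cons, List.tail_cons, List.cons_append]
      refine List.Perm.cons a ?_
      rw [← List.append_assoc]
      refine (List.perm_append_comm.append_right _).trans ?_
      rw [List.append_assoc]
      exact (ih (i + 1)).append_left t

-- ----- run-splitting loop -----

-- Python's A[i-1 : start-1 : -1] for 1 ≤ start ≤ i-1 < len(A): the segment reversed
theorem pv_negslice (xs : List Int) (p q : Nat) (h1 : 1 ≤ q) (h2 : q ≤ p) (h3 : p < xs.length) :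
    (PySem.List.slice? xs (some (p : Int)) (some ((q : Int) - 1)) (-1)).getD []
      = ((xs.drop q).take (p + 1 - q)).reverse := by
  have hfm : ∀ (c pp : Nat), c ≤ pp + 1 → pp < xs.length →
      List.filterMap (fun k : Nat => xs[((pp : Int) + -1 * (k : Int)).toNat]?) (List.range c)
        = ((xs.drop (pp + 1 - c)).take c).reverse := by
    intro c
    induction c with
    | zero => intro pp _ _; simp
    | succ c ih =>
      intro pp hc hp
      rw [List.range_succ, List.filterMap_append, ih pp (by omega) hp]
      have hidx : ((pp : Int) + -1 * (c : Int)).toNat = pp - c := by omega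
      have hlt : pp - c < xs.length := by omega
      rw [show (List.filterMap (fun k : Nat => xs[((pp : Int) + -1 * (k : Int)).toNat]?) [c])
            = [xs[pp - c]] by
          simp only [List.filterMap_cons, List.filterMap_nil, hidx,
            List.getElem?_eq_getElem hlt]]
      conv_rhs => rw [show pp + 1 - (c + 1) = pp - c by omega,
        show xs.drop (pp - c) = xs[pp - c] :: xs.drop (pp - c + 1) from
          List.drop_eq_getElem_cons hlt,
        List.take_succ_cons, List.reverse_cons, show pp - c + 1 = pp + 1 - c by omega]
  rw [PySem.List.slice?]
  rw [if_neg (by omega)]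
  simp only [PySem.List.sliceIndices]
  rw [if_pos (by omega : (-1 : Int) < 0), if_pos (by omega : (-1 : Int) < 0)]
  rw [if_neg (by omega : ¬ (p : Int) < 0), if_neg (by omega : ¬ (q : Int) - 1 < 0)]
  rw [min_eq_left (by omega : (p : Int) ≤ (xs.length : Int) - 1),
    min_eq_left (by omega : (q : Int) - 1 ≤ (xs.length : Int) - 1)]
  rw [if_neg (by omega : ¬ (0 : Int) < -1), if_pos (by omega : (q : Int) - 1 < (p : Int))]
  have hcnt : (((p : Int) - ((q : Int) - 1) + - -1 - 1) / -(-1)).toNat = p + 1 - q := by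
    have : ((p : Int) - ((q : Int) - 1) + - -1 - 1) = (p : Int) - (q : Int) + 1 := by ring
    rw [this, show (- -1 : Int) = 1 by norm_num]
    omega
  rw [hcnt, Option.getD_some, hfm (p + 1 - q) p (by omega) h3,
    show p + 1 - (p + 1 - q) = q by omega]

-- appending one element that the last element relates to keeps a transitive Pairwise
theorem pv_pairwise_snoc {R : Int → Int → Prop} (htrans : ∀ a b c, R a b → R b c → R a c)
    (l : List Int) (hl : l.Pairwise R) (z : Int) (hz : ∀ y, l.getLast? = some y → R y z) :
    (l ++ [z]).Pairwise R := by
  rw [List.pairwise_append]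
  refine ⟨hl, List.pairwise_singleton _ _, ?_⟩
  intro a ha y hy
  rw [List.mem_singleton] at hy
  rw [hy]
  obtain ⟨k, hk, rfl⟩ := List.mem_iff_getElem.mp ha
  have hne : l ≠ [] := by intro h; subst h; simp at hk
  have hlast : l.getLast? = some l[l.length - 1] := by
    rw [List.getLast?_eq_getElem?, List.getElem?_eq_getElem (by omega)]
  have hz' : R l[l.length - 1] z := hz _ hlast
  by_cases hke : k = l.length - 1
  · subst hke; exact hz'
  · have : k < l.length - 1 := by omega
    have hrel : R l[k] l[l.length - 1] :=
      (List.pairwise_iff_getElem.mp hl) k (l.length - 1) (by omega) (by omega) (by omega)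
    exact htrans _ _ _ hrel hz'

theorem pv_seg_succ (A : List Int) (s i : Nat) (hs : s ≤ i) (hi : i < A.length) :
    (A.drop s).take (i + 1 - s) = (A.drop s).take (i - s) ++ [A[i]] := by
  rw [show i + 1 - s = (i - s) + 1 by omega, List.take_add_one, List.getElem?_drop,
    show s + (i - s) = i by omega, List.getElem?_eq_getElem hi]
  rfl

theorem pv_seg_last (A : List Int) (s i : Nat) (hsi : s < i) (hi : i ≤ A.length) :
    ((A.drop s).take (i - s)).getLast? = some (A.getD (i - 1) 0) := by
  rw [List.getLast?_take, List.getElem?_drop, if_neg (by omega),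
    show s + (i - s - 1) = i - 1 by omega, List.getElem?_eq_getElem (by omega),
    List.getD_eq_getElem _ _ (by omega)]
  rfl

theorem pvSplitLoop_spec : ∀ (A : List Int) (subs : List (List Int)) (typ start i : Nat),
    1 ≤ i → i ≤ A.length → start < i →
    (typ = 0 ∨ typ = 1) →
    (typ = 1 → 1 ≤ start) →
    (typ = 0 → ((A.drop start).take (i - start)).Pairwise (· < ·)) →
    (typ = 1 → ((A.drop start).take (i - start)).Pairwise (fun a b => b ≤ a)) →
    (∀ l ∈ subs, l.Pairwise (· ≤ ·)) →
    subs.flatten.Perm (A.take start) →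
    (∀ l ∈ pvSplitLoop A subs typ start i, l.Pairwise (· ≤ ·)) ∧
      (pvSplitLoop A subs typ start i).flatten.Perm A := by
  intro A subs typ start i
  induction subs, typ, start, i using pvSplitLoop.induct (A := A) with
  | case1 subs typ start i hle hcond seg ih =>
    intro h1 h2 h3 htyp hst hseg0 hseg1 hsubs hperm
    rw [pvSplitLoop, if_pos hle, if_pos hcond]
    -- the finished run, as the ascending list it denotes
    rcases htyp with rfl | rfl
    · -- increasing run: the slice A[start:i] itself
      simp only [show ((0 : Nat) == 0) = true from rfl]
      have hsegeq : PySem.List.slice A (some (start : Int)) (some (i : Int))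
          = (A.drop start).take (i - start) := PySem.List.slice_natCast A start i
      have hsegsort : ((A.drop start).take (i - start)).Pairwise (· ≤ ·) :=
        (hseg0 rfl).imp (fun h => le_of_lt h)
      have hflat : ((subs ++ [PySem.List.slice A (some (start : Int)) (some (i : Int))]).flatten).Perm
          (A.take i) := by
        rw [List.flatten_append, List.flatten_cons, List.flatten_nil, List.append_nil, hsegeq]
        refine (hperm.append (List.Perm.refl _)).trans ?_
        rw [show i = start + (i - start) by omega, ← List.take_add]
        rw [show start + (i - start) - start = i - start by omega]
      have hsubs' : ∀ l ∈ subs ++ [PySem.List.slice A (some (start : Int)) (some (i : Int))],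
          l.Pairwise (· ≤ ·) := by
        intro l hl
        rcases List.mem_append.mp hl with hl | hl
        · exact hsubs l hl
        · rw [List.mem_singleton] at hl; subst hl; rw [hsegeq]; exact hsegsort
      by_cases hi : i = A.length
      · rw [pvSplitLoop, if_neg (by omega)]
        subst hi
        rw [List.take_length] at hflat
        exact ⟨hsubs', hflat⟩
      · refine ih (by omega) (by omega) (by omega) (Or.inr rfl) (fun _ => h1)
          (fun h => absurd h (by decide)) ?_ hsubs' hflat
        intro _
        try rw [show i + 1 - i = 1 by omega]
        rw [show List.take 1 (A.drop i) = [A[i]] by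
          rw [List.drop_eq_getElem_cons (by omega : i < A.length), List.take_succ_cons,
            List.take_zero]]
        exact List.pairwise_singleton _ _
    · -- decreasing run: the reversed slice A[i-1:start-1:-1]
      simp only [show ((1 : Nat) == 0) = false from rfl, Bool.false_eq_true]
      have hstart : 1 ≤ start := hst rfl
      have him1 : i - 1 < A.length := by omega
      have hsegeq : (PySem.List.slice? A (some ((i : Int) - 1)) (some ((start : Int) - 1)) (-1)).getD []
          = ((A.drop start).take (i - start)).reverse := by
        rw [show ((i : Int) - 1) = (((i - 1 : Nat) : Int)) by omega]
        rw [pv_negslice A (i - 1) start hstart (by omega) him1,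
          show i - 1 + 1 - start = i - start by omega]
      have hsegsort : (((A.drop start).take (i - start)).reverse).Pairwise (· ≤ ·) :=
        List.pairwise_reverse.mpr (hseg1 rfl)
      have hflat : ((subs ++ [(PySem.List.slice? A (some ((i : Int) - 1)) (some ((start : Int) - 1)) (-1)).getD []]).flatten).Perm
          (A.take i) := by
        rw [List.flatten_append, List.flatten_cons, List.flatten_nil, List.append_nil, hsegeq]
        refine (hperm.append (List.reverse_perm _)).trans ?_
        rw [show i = start + (i - start) by omega, ← List.take_add]
        rw [show start + (i - start) - start = i - start by omega]
      have hsubs' : ∀ l ∈ subs ++ [(PySem.List.slice? A (some ((i : Int) - 1)) (some ((start : Int) - 1)) (-1)).getD []],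
          l.Pairwise (· ≤ ·) := by
        intro l hl
        rcases List.mem_append.mp hl with hl | hl
        · exact hsubs l hl
        · rw [List.mem_singleton] at hl; subst hl; rw [hsegeq]; exact hsegsort
      by_cases hi : i = A.length
      · rw [pvSplitLoop, if_neg (by omega)]
        subst hi
        rw [List.take_length] at hflat
        exact ⟨hsubs', hflat⟩
      · refine ih (by omega) (by omega) (by omega) (Or.inl rfl) (fun h => absurd h (by decide)) ?_
          (fun h => absurd h (by decide)) hsubs' hflat
        intro _
        try rw [show i + 1 - i = 1 by omega]
        rw [show List.take 1 (A.drop i) = [A[i]] by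
          rw [List.drop_eq_getElem_cons (by omega : i < A.length), List.take_succ_cons,
            List.take_zero]]
        exact List.pairwise_singleton _ _
  | case2 subs typ start i hle hcond ih =>
    intro h1 h2 h3 htyp hst hseg0 hseg1 hsubs hperm
    rw [pvSplitLoop, if_pos hle, if_neg hcond]
    have hne : i ≠ A.length := by
      intro he
      exact hcond (by simp [he])
    have hilt : i < A.length := by omega
    have hgdi : A.getD i 0 = A[i] := List.getD_eq_getElem _ _ hilt
    have hlast := pv_seg_last A start i h3 h2
    have hsucc := pv_seg_succ A start i (by omega) hilt
    refine ih (by omega) (by omega) (by omega) htyp hst ?_ ?_ hsubs hperm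
    · intro ht0
      subst ht0
      rw [hsucc]
      refine pv_pairwise_snoc (R := fun a b => a < b) (fun a b c => lt_trans) _ (hseg0 rfl) _ ?_
      intro y hy
      rw [hlast] at hy
      injection hy with hy
      subst hy
      have hlt : A.getD (i - 1) 0 < A.getD i 0 := by
        by_contra hnlt
        have hdis : A.getD i 0 ≤ A.getD (i - 1) 0 := by omega
        exact hcond (by simp only [Bool.or_eq_true, Bool.and_eq_true, beq_iff_eq, decide_eq_true_eq]; exact Or.inr ⟨hdis, trivial⟩)
      rw [hgdi] at hlt
      exact hlt
    · intro ht1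
      subst ht1
      rw [hsucc]
      refine pv_pairwise_snoc (R := fun a b => b ≤ a) (fun a b c hab hbc => le_trans hbc hab) _ (hseg1 rfl) _ ?_
      intro y hy
      rw [hlast] at hy
      injection hy with hy
      subst hy
      have hge : A.getD i 0 ≤ A.getD (i - 1) 0 := by
        by_contra hngt
        have hdis : A.getD (i - 1) 0 < A.getD i 0 := by omega
        exact hcond (by simp only [Bool.or_eq_true, Bool.and_eq_true, beq_iff_eq, decide_eq_true_eq]; exact Or.inl (Or.inr ⟨hdis, trivial⟩))
      rw [hgdi] at hge
      exact hge
  | case3 subs typ start i hgt =>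
    intro _ h2
    exact absurd h2 hgt

-- ----- assembling the two sides -----

theorem pv_getD_map_tail (runs : List (List Int)) (j : Nat) :
    (runs.map List.tail).getD j [] = (runs.getD j []).tail := by
  by_cases hj : j < runs.length
  · rw [List.getD_eq_getElem _ _ (by simpa using hj), List.getD_eq_getElem _ _ hj,
      List.getElem_map]
  · rw [List.getD_eq_getElem?_getD, List.getElem?_eq_none (by simpa using hj),
      List.getD_eq_getElem?_getD, List.getElem?_eq_none (by omega)]
    rfl

theorem pv_merge_of_runs (runs : List (List Int)) (A : List Int)
    (hrs : ∀ l ∈ runs, l.Pairwise (· ≤ ·)) (hrp : runs.flatten.Perm A) :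
    (merge_sorted_arrays runs).Pairwise (· ≤ ·) ∧ (merge_sorted_arrays runs).Perm A := by
  have cov0 : ∀ j, (runs.map List.tail).getD j [] ≠ [] → ∃ v, (v, j) ∈ pvInitHeap runs 0 := by
    intro j hj
    rw [pv_getD_map_tail] at hj
    have hjlt : j < runs.length := by
      by_contra hge
      rw [List.getD_eq_getElem?_getD, List.getElem?_eq_none (by omega)] at hj
      simp at hj
    rw [List.getD_eq_getElem _ _ hjlt] at hj
    rcases hrj : runs[j] with _ | ⟨x, xs⟩
    · rw [hrj] at hj; simp at hj
    · exact ⟨x, by simpa using pvInitHeap_mem runs 0 j x xs hjlt hrj⟩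
  have hruns0 : ∀ l ∈ runs.map List.tail, l.Pairwise (· ≤ ·) := by
    intro l hl
    obtain ⟨l', hl', rfl⟩ := List.mem_map.mp hl
    exact (hrs l' hl').tail
  have hbnd0 : ∀ p ∈ pvInitHeap runs 0, ∀ y ∈ (runs.map List.tail).getD p.2 [], p.1 ≤ y := by
    intro p hp y hy
    obtain ⟨j, hj1, hj2, xs, hxs⟩ := pvInitHeap_char runs 0 p hp
    rw [pv_getD_map_tail, hj1, show 0 + j = j by omega, List.getD_eq_getElem _ _ hj2, hxs] at hy
    have := hrs runs[j] (List.getElem_mem hj2)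
    rw [hxs, List.pairwise_cons] at this
    exact this.1 y hy
  obtain ⟨hsor, _⟩ := pvMergeLoop_sorted (runs.map List.tail) (pvInitHeap runs 0) hruns0 hbnd0
  have hperm := pvMergeLoop_perm (runs.map List.tail) (pvInitHeap runs 0) cov0
  exact ⟨hsor, (hperm.trans (pvInitHeap_perm runs 0)).trans hrp⟩

-- ===== VERDICT (by name: the statement is the Claim_ definition above) =====
theorem sort_increasing_decreasing_array_spec : Claim_equal_sort_increasing_decreasing_array := by
  intro A _
  unfold Spec_sort_increasing_decreasing_array sort_increasing_decreasing_array_alt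
  by_cases hA : A = []
  · subst hA
    unfold sort_increasing_decreasing_array
    rw [show pvSplitLoop [] [] 0 0 1 = [] by rw [pvSplitLoop]; simp]
    unfold merge_sorted_arrays
    rw [show (([] : List (List Int)).map List.tail) = [] from rfl,
      show pvInitHeap [] 0 = [] from rfl, show pvMergeLoop [] [] = [] by rw [pvMergeLoop]]
    exact ((PySem.List.sorted_eq_nil_iff _ _ _).mpr rfl).symm
  · have hlen : 1 ≤ A.length := by
      cases A with
      | nil => exact absurd rfl hA
      | cons a t => simp
    have hseg1 : ((A.drop 0).take (1 - 0)).Pairwise (· < ·) := by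
      cases A with
      | nil => exact absurd rfl hA
      | cons a t => simp
    obtain ⟨hrs, hrp⟩ := pvSplitLoop_spec A [] 0 0 1
      (by omega) hlen (by omega) (Or.inl rfl) (by omega)
      (fun _ => hseg1) (by omega) (by simp) (by simp)
    obtain ⟨hsor, hperm⟩ := pv_merge_of_runs _ A hrs hrp
    unfold sort_increasing_decreasing_array
    exact (PySem.List.sorted_id_eq_of_perm_of_pairwise A _ hperm hsor).symm
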